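-- pv_equiv track=rewrite | github.com/desaizeeshan22/Leetcode_problems | BFS_code_generic.py | BFS
-- ===== SOURCE A (Python) =====
-- def BFS(node,adj_list):
--     level={node:0} ## source node
--     parent={node:None}  ## source node has no parent (this structure is optional)
--     i=1
--     frontier=[node] ## first start from the source node
--     while frontier: ## while the frontier collection is not empty
--         next=[]
--         for u in frontier: ## for node in frontier
--             for elem in adj_list[u]: # for node in adjacency list of each frontier
--                 if elem not in level:## if we have not visited the node before
--                     level[elem]=i ## set level to current i
--                     parent[elem]=u## parent of element is the node whose adjacency list the element belongs to
--                     next.append(elem) ## append the elements of the adjacency list to traverse next along the breadth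
--         frontier=next## the next level becomes the current level
--         i+=1## increase level count every iteration
--     return level,parent
-- ===== SOURCE B (Python) =====
-- def BFS(node, adj_list):
--     # one combined dict node -> (level, parent); discovery-order list doubles as the work list
--     info = {node: (0, None)}
--     order = [node]
--     head = 0
--     while head < len(order):
--         u = order[head]
--         head += 1
--         d = info[u][0] + 1
--         for v in adj_list[u]:
--             if v not in info:
--                 info[v] = (d, u)
--                 order.append(v)
--     level = {k: lp[0] for k, lp in info.items()}
--     parent = {k: lp[1] for k, lp in info.items()}
--     return level, parent
-- ===== Notes on version B (the rewrite author's own statement) =====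
-- stated objective: alternative
-- what changed: Replaces the layer-by-layer frontier/next lists with shared counter i and two separate dicts by an index-cursor BFS over a single discovery-order list that doubles as the work queue, maintaining one combined dict node->(level,parent) that is split into the two result dicts at the end.
import Mathlib
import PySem

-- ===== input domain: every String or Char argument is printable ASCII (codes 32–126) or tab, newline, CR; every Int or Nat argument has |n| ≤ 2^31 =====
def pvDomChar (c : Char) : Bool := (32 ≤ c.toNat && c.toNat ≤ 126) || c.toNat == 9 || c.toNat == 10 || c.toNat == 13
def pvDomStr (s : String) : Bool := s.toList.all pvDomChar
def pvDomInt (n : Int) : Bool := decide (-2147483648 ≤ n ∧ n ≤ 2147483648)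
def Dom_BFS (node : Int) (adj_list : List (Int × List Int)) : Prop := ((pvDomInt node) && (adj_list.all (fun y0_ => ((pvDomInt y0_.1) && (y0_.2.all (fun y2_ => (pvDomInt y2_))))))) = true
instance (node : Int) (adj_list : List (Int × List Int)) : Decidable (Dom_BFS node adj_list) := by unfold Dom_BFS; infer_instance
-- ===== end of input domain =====

-- B replaces A's per-layer frontier/next lists, shared counter i and two separate dicts by an
-- index-cursor BFS over one discovery-order list and one combined node->(level,parent) dict,
-- split into the two result dicts at the end (objective: alternative; no speed claim).

-- ===== PORT A =====
-- state: ((level, parent), next)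
def pvAInn (i u : Int) (s : (PySem.Dict Int Int × PySem.Dict Int (Option Int)) × List Int)
    (elem : Int) : (PySem.Dict Int Int × PySem.Dict Int (Option Int)) × List Int :=
  if s.1.1.contains elem then s
  else ((s.1.1.insert elem i, s.1.2.insert elem (some u)), s.2 ++ [elem])

-- the while loop; fuel is only a totality guard (proved never to run out for the fuel BFS passes)
def pvALoop (adj : PySem.Dict Int (List Int)) :
    Nat → PySem.Dict Int Int → PySem.Dict Int (Option Int) → Int → List Int →
    PySem.Dict Int Int × PySem.Dict Int (Option Int)
  | 0, l, p, _, _ => (l, p)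
  | f + 1, l, p, i, frontier =>
    if frontier = [] then (l, p)
    else
      let s := frontier.foldl (fun s u => (adj.getD u []).foldl (pvAInn i u) s) ((l, p), [])
      pvALoop adj f s.1.1 s.1.2 (i + 1) s.2

def BFS (node : Int) (adj_list : List (Int × List Int)) : (List (Int × Int)) × (List (Int × Option Int)) :=
  let adj := PySem.Dict.ofList adj_list
  let r := pvALoop adj ((adj_list.flatMap (fun kv => kv.2)).length + 2)
    (PySem.Dict.empty.insert node 0) (PySem.Dict.empty.insert node none) 1 [node]
  (r.1.items, r.2.items)

-- ===== PORT B =====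
-- the inner 'for v in adj_list[u]' loop: structural recursion over the neighbour list
def pvBVisit (d u : Int) :
    List Int → PySem.Dict Int (Int × Option Int) → List Int →
    PySem.Dict Int (Int × Option Int) × List Int
  | [], info, order => (info, order)
  | v :: vs, info, order =>
    if info.contains v then pvBVisit d u vs info order
    else pvBVisit d u vs (info.insert v (d, some u)) (order ++ [v])

-- the 'while head < len(order)' loop; fuel is only a totality guard
def pvBLoop (adj : PySem.Dict Int (List Int)) :
    Nat → PySem.Dict Int (Int × Option Int) → List Int → Nat →
    PySem.Dict Int (Int × Option Int)
  | 0, info, _, _ => info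
  | f + 1, info, order, head =>
    if head < order.length then
      let u := order.getD head 0
      -- info[u]: u is inserted into info before being appended to order, so the lookup succeeds; getD is exact there
      let d := (info.getD u (0, none)).1 + 1
      let s := pvBVisit d u (adj.getD u []) info order
      pvBLoop adj f s.1 s.2 (head + 1)
    else info

def BFS_alt (node : Int) (adj_list : List (Int × List Int)) : (List (Int × Int)) × (List (Int × Option Int)) :=
  let adj := PySem.Dict.ofList adj_list
  let info := pvBLoop adj ((adj_list.flatMap (fun kv => kv.2)).length + 2)
    (PySem.Dict.empty.insert node (0, none)) [node] 0
  ((PySem.Dict.ofList (info.items.map (fun kv => (kv.1, kv.2.1)))).items,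
   (PySem.Dict.ofList (info.items.map (fun kv => (kv.1, kv.2.2)))).items)

-- ===== PRECONDITION & SPEC =====
-- Pre_ is exactly the inputs on which A returns: some subset R of the keys contains the source and is closed
-- under listed adjacency (i.e. every vertex reachable from the source is a key of the dict); otherwise A's
-- traversal reaches a vertex with no entry and raises KeyError.
def Pre_BFS (node : Int) (adj_list : List (Int × List Int)) : Prop :=
  ∃ R ∈ (adj_list.map Prod.fst).sublists,
    node ∈ R ∧ ∀ u ∈ R, ∀ v ∈ (PySem.Dict.ofList adj_list).getD u [], v ∈ R
instance (node : Int) (adj_list : List (Int × List Int)) : Decidable (Pre_BFS node adj_list) := by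
  unfold Pre_BFS; infer_instance

def pvWitness_BFS : Int × (List (Int × List Int)) := (0, [(0, [1, 2]), (1, [2]), (2, [0])])

def Spec_BFS (node : Int) (adj_list : List (Int × List Int)) (out : (List (Int × Int)) × (List (Int × Option Int))) : Prop := out = BFS_alt node adj_list
instance (node : Int) (adj_list : List (Int × List Int)) (out : (List (Int × Int)) × (List (Int × Option Int))) : Decidable (Spec_BFS node adj_list out) := by unfold Spec_BFS; infer_instance

-- ===== CLAIM (what is proved, stated in full; the proofs are below) =====
def Claim_equal_BFS : Prop := ∀ (node : Int) (adj_list : List (Int × List Int)), Dom_BFS node adj_list → Pre_BFS node adj_list → Spec_BFS node adj_list (BFS node adj_list)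

-- ===== LEMMAS AND PROOFS =====

-- proof-side intermediate: the popping single-queue BFS on A's pair of dicts
def pvQLoop (adj : PySem.Dict Int (List Int)) :
    Nat → PySem.Dict Int Int → PySem.Dict Int (Option Int) → List Int →
    PySem.Dict Int Int × PySem.Dict Int (Option Int)
  | 0, l, p, _ => (l, p)
  | f + 1, l, p, q =>
    match q with
    | [] => (l, p)
    | u :: rest =>
      let w := l.getD u 0 + 1
      let s := (adj.getD u []).foldl (pvAInn w u) ((l, p), rest)
      pvQLoop adj f s.1.1 s.1.2 s.2

theorem pvAInn_pos (i u : Int) (s : (PySem.Dict Int Int × PySem.Dict Int (Option Int)) × List Int)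
    (e : Int) (h : s.1.1.contains e = true) : pvAInn i u s e = s := by
  simp [pvAInn, h]

theorem pvAInn_neg (i u : Int) (s : (PySem.Dict Int Int × PySem.Dict Int (Option Int)) × List Int)
    (e : Int) (h : s.1.1.contains e = false) :
    pvAInn i u s e = ((s.1.1.insert e i, s.1.2.insert e (some u)), s.2 ++ [e]) := by
  simp [pvAInn, h]

-- proof-side abbreviation: one frontier node's inner loop
def pvStep (adj : PySem.Dict Int (List Int)) (i u : Int)
    (s : (PySem.Dict Int Int × PySem.Dict Int (Option Int)) × List Int) :
    (PySem.Dict Int Int × PySem.Dict Int (Option Int)) × List Int :=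
  (adj.getD u []).foldl (pvAInn i u) s

-- one whole layer of A, threading ((level, parent), next)
def pvLayer (adj : PySem.Dict Int (List Int)) (i : Int)
    (l : PySem.Dict Int Int) (p : PySem.Dict Int (Option Int)) (F : List Int) :
    (PySem.Dict Int Int × PySem.Dict Int (Option Int)) × List Int :=
  F.foldl (fun s u => pvStep adj i u s) ((l, p), [])

-- unfolding equations for the loops
theorem pvALoop_succ (adj : PySem.Dict Int (List Int)) (f : Nat) (l : PySem.Dict Int Int)
    (p : PySem.Dict Int (Option Int)) (i : Int) (F : List Int) :
    pvALoop adj (f + 1) l p i F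
      = if F = [] then (l, p)
        else pvALoop adj f (pvLayer adj i l p F).1.1 (pvLayer adj i l p F).1.2 (i + 1)
          (pvLayer adj i l p F).2 := rfl

theorem pvQLoop_cons (adj : PySem.Dict Int (List Int)) (f : Nat) (l : PySem.Dict Int Int)
    (p : PySem.Dict Int (Option Int)) (u : Int) (rest : List Int) :
    pvQLoop adj (f + 1) l p (u :: rest)
      = pvQLoop adj f
          ((adj.getD u []).foldl (pvAInn (l.getD u 0 + 1) u) ((l, p), rest)).1.1
          ((adj.getD u []).foldl (pvAInn (l.getD u 0 + 1) u) ((l, p), rest)).1.2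
          ((adj.getD u []).foldl (pvAInn (l.getD u 0 + 1) u) ((l, p), rest)).2 := rfl

theorem pvQLoop_nil (adj : PySem.Dict Int (List Int)) (f : Nat) (l : PySem.Dict Int Int)
    (p : PySem.Dict Int (Option Int)) : pvQLoop adj f l p [] = (l, p) := by
  cases f with
  | zero => rfl
  | succ f' => rfl

theorem pvALoop_nilF (adj : PySem.Dict Int (List Int)) (f : Nat) (l : PySem.Dict Int Int)
    (p : PySem.Dict Int (Option Int)) (i : Int) : pvALoop adj f l p i [] = (l, p) := by
  cases f with
  | zero => rfl
  | succ f' => rfl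

theorem foldl_q {A : Type}
    (f : (PySem.Dict Int Int × PySem.Dict Int (Option Int)) × List Int → A →
         (PySem.Dict Int Int × PySem.Dict Int (Option Int)) × List Int)
    (hf : ∀ d q e, f (d, q) e = ((f (d, []) e).1, q ++ (f (d, []) e).2)) :
    ∀ (lst : List A) d q,
      lst.foldl f (d, q) = ((lst.foldl f (d, [])).1, q ++ (lst.foldl f (d, [])).2) := by
  intro lst
  induction lst with
  | nil => intro d q; simp
  | cons e t ih =>
    intro d q
    rw [List.foldl_cons, List.foldl_cons, hf d q e]
    rw [ih (f (d, []) e).1 (q ++ (f (d, []) e).2), ih (f (d, []) e).1 (f (d, []) e).2]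
    simp

theorem pvAInn_q (i u : Int) (d : PySem.Dict Int Int × PySem.Dict Int (Option Int))
    (q : List Int) (e : Int) :
    pvAInn i u (d, q) e = ((pvAInn i u (d, []) e).1, q ++ (pvAInn i u (d, []) e).2) := by
  by_cases h : d.1.contains e = true
  · simp [pvAInn, h]
  · simp [pvAInn, h]

theorem pvStep_q (adj : PySem.Dict Int (List Int)) (i u : Int)
    (d : PySem.Dict Int Int × PySem.Dict Int (Option Int)) (q : List Int) :
    pvStep adj i u (d, q) = ((pvStep adj i u (d, [])).1, q ++ (pvStep adj i u (d, [])).2) := by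
  unfold pvStep
  exact foldl_q (pvAInn i u) (pvAInn_q i u) (adj.getD u []) d q

theorem pvInn_pres (i u : Int) :
    ∀ (lst : List Int) (s : (PySem.Dict Int Int × PySem.Dict Int (Option Int)) × List Int)
      (k : Int) (v : Int), s.1.1.get? k = some v →
      (lst.foldl (pvAInn i u) s).1.1.get? k = some v := by
  intro lst
  induction lst with
  | nil => intro s k v h; exact h
  | cons e t ih =>
    intro s k v h
    rw [List.foldl_cons]
    apply ih
    by_cases hc : s.1.1.contains e = true
    · rw [pvAInn_pos i u s e hc]; exact h
    · have hc' : s.1.1.contains e = false := by simpa using hc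
      have hne : k ≠ e := by
        intro hk
        have hnone : s.1.1.get? e = none := (PySem.Dict.get?_eq_none_iff_contains _ _).2 hc'
        rw [hk, hnone] at h
        simp at h
      rw [pvAInn_neg i u s e hc']
      simpa [PySem.Dict.get?_insert_of_ne _ _ hne] using h

-- every element of the produced queue/next list already has level i
theorem pvInn_new (i u : Int) :
    ∀ (lst : List Int) (s : (PySem.Dict Int Int × PySem.Dict Int (Option Int)) × List Int),
      (∀ k ∈ s.2, s.1.1.get? k = some i) →
      ∀ k ∈ (lst.foldl (pvAInn i u) s).2, (lst.foldl (pvAInn i u) s).1.1.get? k = some i := by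
  intro lst
  induction lst with
  | nil => intro s h; exact h
  | cons e t ih =>
    intro s h
    rw [List.foldl_cons]
    apply ih
    by_cases hc : s.1.1.contains e = true
    · rw [pvAInn_pos i u s e hc]; exact h
    · have hc' : s.1.1.contains e = false := by simpa using hc
      rw [pvAInn_neg i u s e hc']
      intro k hk
      simp only [List.mem_append, List.mem_singleton] at hk
      rcases hk with hk | hk
      · have hne : k ≠ e := by
          intro hkeq
          have hnone : s.1.1.get? e = none := (PySem.Dict.get?_eq_none_iff_contains _ _).2 hc'
          have h2 := h k hk
          rw [hkeq, hnone] at h2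
          simp at h2
        simpa [PySem.Dict.get?_insert_of_ne _ _ hne] using h k hk
      · subst hk
        simp [PySem.Dict.get?_insert_self]

theorem pvLayer_new (adj : PySem.Dict Int (List Int)) (i : Int) :
    ∀ (F : List Int) (s : (PySem.Dict Int Int × PySem.Dict Int (Option Int)) × List Int),
      (∀ k ∈ s.2, s.1.1.get? k = some i) →
      ∀ k ∈ (F.foldl (fun s u => pvStep adj i u s) s).2,
        (F.foldl (fun s u => pvStep adj i u s) s).1.1.get? k = some i := by
  intro F
  induction F with
  | nil => intro s h; exact h
  | cons u t ih =>
    intro s h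
    rw [List.foldl_cons]
    exact ih _ (pvInn_new i u _ s h)

-- size bookkeeping: each queued element corresponds to one fresh level entry
theorem pvInn_size (i u : Int) :
    ∀ (lst : List Int) (s : (PySem.Dict Int Int × PySem.Dict Int (Option Int)) × List Int),
      (lst.foldl (pvAInn i u) s).1.1.size + s.2.length
        = s.1.1.size + (lst.foldl (pvAInn i u) s).2.length := by
  intro lst
  induction lst with
  | nil => intro s; rfl
  | cons e t ih =>
    intro s
    rw [List.foldl_cons]
    by_cases hc : s.1.1.contains e = true
    · rw [pvAInn_pos i u s e hc]
      exact ih s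
    · have hc' : s.1.1.contains e = false := by simpa using hc
      rw [pvAInn_neg i u s e hc']
      have h2 := ih ((s.1.1.insert e i, s.1.2.insert e (some u)), s.2 ++ [e])
      simp only [List.length_append, List.length_singleton] at h2 ⊢
      rw [PySem.Dict.size_insert] at h2
      simp only [hc', if_neg, Bool.false_eq_true, not_false_iff] at h2
      omega

theorem pvLayer_size (adj : PySem.Dict Int (List Int)) (i : Int) :
    ∀ (F : List Int) (s : (PySem.Dict Int Int × PySem.Dict Int (Option Int)) × List Int),
      (F.foldl (fun s u => pvStep adj i u s) s).1.1.size + s.2.length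
        = s.1.1.size + (F.foldl (fun s u => pvStep adj i u s) s).2.length := by
  intro F
  induction F with
  | nil => intro s; rfl
  | cons u t ih =>
    intro s
    rw [List.foldl_cons]
    have h1 := pvInn_size i u (adj.getD u []) s
    have h2 := ih (pvStep adj i u s)
    unfold pvStep at h1 h2 ⊢
    omega

-- keys of the level dict only grow by listed neighbours
theorem pvInn_keys (i u : Int) :
    ∀ (lst : List Int) (s : (PySem.Dict Int Int × PySem.Dict Int (Option Int)) × List Int)
      (k : Int), k ∈ (lst.foldl (pvAInn i u) s).1.1.keys → k ∈ s.1.1.keys ∨ k ∈ lst := by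
  intro lst
  induction lst with
  | nil => intro s k h; exact Or.inl h
  | cons e t ih =>
    intro s k h
    rw [List.foldl_cons] at h
    rcases ih (pvAInn i u s e) k h with h1 | h1
    · by_cases hc : s.1.1.contains e = true
      · rw [pvAInn_pos i u s e hc] at h1
        exact Or.inl h1
      · have hc' : s.1.1.contains e = false := by simpa using hc
        rw [pvAInn_neg i u s e hc'] at h1
        rcases (PySem.Dict.mem_keys_insert _ _ _ _).1 h1 with h2 | h2
        · exact Or.inr (by simp [h2])
        · exact Or.inl h2
    · exact Or.inr (List.mem_cons_of_mem _ h1)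

theorem pvInn_nodup (i u : Int) :
    ∀ (lst : List Int) (s : (PySem.Dict Int Int × PySem.Dict Int (Option Int)) × List Int),
      s.1.1.keys.Nodup → (lst.foldl (pvAInn i u) s).1.1.keys.Nodup := by
  intro lst
  induction lst with
  | nil => intro s h; exact h
  | cons e t ih =>
    intro s h
    rw [List.foldl_cons]
    apply ih
    by_cases hc : s.1.1.contains e = true
    · rw [pvAInn_pos i u s e hc]; exact h
    · have hc' : s.1.1.contains e = false := by simpa using hc
      rw [pvAInn_neg i u s e hc']
      exact PySem.Dict.nodup_keys_insert _ _ _ h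

theorem pvLayer_nodup (adj : PySem.Dict Int (List Int)) (i : Int) :
    ∀ (F : List Int) (s : (PySem.Dict Int Int × PySem.Dict Int (Option Int)) × List Int),
      s.1.1.keys.Nodup → (F.foldl (fun s u => pvStep adj i u s) s).1.1.keys.Nodup := by
  intro F
  induction F with
  | nil => intro s h; exact h
  | cons u t ih =>
    intro s h
    rw [List.foldl_cons]
    exact ih _ (pvInn_nodup i u _ s h)

-- the pairs of (ofList A).items all occur in A
theorem pvItems_update_sub {K V : Type} [BEq K] [LawfulBEq K] :
    ∀ (A : List (K × V)) (d : PySem.Dict K V) (p : K × V),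
      p ∈ (d.update A).items → p ∈ d.items ∨ p ∈ A := by
  intro A
  induction A with
  | nil => intro d p h; exact Or.inl h
  | cons q t ih =>
    intro d p h
    have h0 : d.update (q :: t) = (d.insert q.1 q.2).update t := rfl
    rw [h0] at h
    rcases ih _ p h with h1 | h1
    · rcases (PySem.Dict.mem_items_insert _ _ _ _).1 h1 with h2 | h2
      · exact Or.inr (by simp [h2])
      · exact Or.inl h2.1
    · exact Or.inr (List.mem_cons_of_mem _ h1)

theorem pvGetD_sub (A : List (Int × List Int)) (u x : Int)
    (h : x ∈ (PySem.Dict.ofList A).getD u []) : x ∈ A.flatMap (fun kv => kv.2) := by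
  rw [PySem.Dict.getD] at h
  cases hg : (PySem.Dict.ofList A).get? u with
  | none => rw [hg] at h; simp at h
  | some v =>
    rw [hg] at h
    simp only [Option.getD_some] at h
    have hm := PySem.Dict.mem_items_of_get?_eq_some _ hg
    have hsub : (u, v) ∈ PySem.Dict.empty.items ∨ (u, v) ∈ A := pvItems_update_sub A _ _ hm
    rcases hsub with h2 | h2
    · simp [PySem.Dict.empty] at h2
    · exact List.mem_flatMap.2 ⟨(u, v), h2, h⟩

theorem pvLayer_keys (adj : PySem.Dict Int (List Int)) (i : Int) (U : List Int)
    (HadjU : ∀ u x, x ∈ adj.getD u [] → x ∈ U) :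
    ∀ (F : List Int) (s : (PySem.Dict Int Int × PySem.Dict Int (Option Int)) × List Int),
      (∀ k ∈ s.1.1.keys, k ∈ U) →
      ∀ k ∈ (F.foldl (fun s u => pvStep adj i u s) s).1.1.keys, k ∈ U := by
  intro F
  induction F with
  | nil => intro s h; exact h
  | cons u t ih =>
    intro s h
    rw [List.foldl_cons]
    apply ih
    intro k hk
    rcases pvInn_keys i u (adj.getD u []) s k hk with h1 | h1
    · exact h k h1
    · exact HadjU u k h1

theorem pvNodup_sub_length {U l : List Int} (hn : l.Nodup) (hs : ∀ k ∈ l, k ∈ U) :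
    l.length ≤ U.length := by
  calc l.length = l.toFinset.card := (List.toFinset_card_of_nodup hn).symm
    _ ≤ U.toFinset.card := Finset.card_le_card (by intro x hx; simp only [List.mem_toFinset] at hx ⊢; exact hs x hx)
    _ ≤ U.length := List.toFinset_card_le U

-- the queue loop consumes a whole layer F exactly as A's nested fold processes it
theorem pvConsume (adj : PySem.Dict Int (List Int)) (i : Int) :
    ∀ (F : List Int) (f : Nat) (l : PySem.Dict Int Int) (p : PySem.Dict Int (Option Int))
      (N : List Int),
      (∀ u ∈ F, l.get? u = some (i - 1)) →
      pvQLoop adj (F.length + f) l p (F ++ N)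
        = pvQLoop adj f (pvLayer adj i l p F).1.1 (pvLayer adj i l p F).1.2
            (N ++ (pvLayer adj i l p F).2) := by
  intro F
  induction F with
  | nil => intro f l p N _; simp [pvLayer]
  | cons u F' ih =>
    intro f l p N hF
    have hu : l.getD u 0 = i - 1 :=
      PySem.Dict.getD_of_get?_eq_some _ _ (hF u (List.mem_cons_self))
    have hw : l.getD u 0 + 1 = i := by rw [hu]; ring
    have hlen : (u :: F').length + f = (F'.length + f) + 1 := by simp; omega
    rw [hlen, List.cons_append, pvQLoop_cons, hw]
    rw [foldl_q (pvAInn i u) (pvAInn_q i u) (adj.getD u []) (l, p) (F' ++ N)]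
    set r := (adj.getD u []).foldl (pvAInn i u) ((l, p), []) with hr
    have hF' : ∀ w ∈ F', r.1.1.get? w = some (i - 1) := by
      intro w hwmem
      exact pvInn_pres i u _ _ w _ (hF w (List.mem_cons_of_mem _ hwmem))
    have happ : F' ++ N ++ r.2 = F' ++ (N ++ r.2) := by simp
    rw [happ]
    rw [ih f r.1.1 r.1.2 (N ++ r.2) hF']
    have hlayer : pvLayer adj i l p (u :: F')
        = ((pvLayer adj i r.1.1 r.1.2 F').1, r.2 ++ (pvLayer adj i r.1.1 r.1.2 F').2) := by
      show List.foldl (fun s u => pvStep adj i u s) (pvStep adj i u ((l, p), [])) F' = _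
      have h1 : pvStep adj i u ((l, p), []) = (r.1, r.2) := rfl
      rw [h1]
      exact foldl_q (fun s u => pvStep adj i u s) (fun d q e => pvStep_q adj i e d q) F' r.1 r.2
    rw [hlayer]
    simp [List.append_assoc]

-- the simulation: with enough fuel on both sides, A's layered loop equals the popping queue loop
theorem pvSim (adj : PySem.Dict Int (List Int)) (U : List Int)
    (HadjU : ∀ u x, x ∈ adj.getD u [] → x ∈ U) :
    ∀ (fA : Nat) (fB : Nat) (l : PySem.Dict Int Int) (p : PySem.Dict Int (Option Int))
      (i : Int) (F : List Int),
      (∀ u ∈ F, l.get? u = some (i - 1)) →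
      l.keys.Nodup →
      (∀ k ∈ l.keys, k ∈ U) →
      U.length + 1 ≤ fA + l.size →
      F.length + U.length + 1 ≤ fB + l.size →
      pvALoop adj fA l p i F = pvQLoop adj fB l p F := by
  intro fA
  induction fA with
  | zero =>
    intro fB l p i F _ hnd hsub hfA _
    have hle := pvNodup_sub_length hnd hsub
    have hsz : l.size = l.keys.length := by simp [PySem.Dict.size, PySem.Dict.keys]
    omega
  | succ f ih =>
    intro fB l p i F hF hnd hsub hfA hfB
    by_cases hFe : F = []
    · subst hFe
      rw [pvALoop_nilF, pvQLoop_nil]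
    · have hsz : l.size = l.keys.length := by simp [PySem.Dict.size, PySem.Dict.keys]
      have hszU : l.size ≤ U.length := by
        rw [hsz]; exact pvNodup_sub_length hnd hsub
      have hF1 : 1 ≤ F.length := by
        cases F with
        | nil => exact absurd rfl hFe
        | cons a t => simp
      have hfBF : F.length ≤ fB := by omega
      rw [pvALoop_succ, if_neg hFe]
      have hB : pvQLoop adj fB l p F
          = pvQLoop adj (fB - F.length) (pvLayer adj i l p F).1.1 (pvLayer adj i l p F).1.2
              (pvLayer adj i l p F).2 := by
        have h1 : pvQLoop adj fB l p F = pvQLoop adj (F.length + (fB - F.length)) l p (F ++ []) := by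
          rw [List.append_nil]; congr 1; omega
        rw [h1, pvConsume adj i F (fB - F.length) l p [] hF]
        simp
      rw [hB]
      have hsize : (pvLayer adj i l p F).1.1.size = l.size + (pvLayer adj i l p F).2.length := by
        have h := pvLayer_size adj i F ((l, p), [])
        simpa [pvLayer] using h
      by_cases hnxe : (pvLayer adj i l p F).2 = []
      · rw [hnxe, pvALoop_nilF, pvQLoop_nil]
      · have hnx1 : 1 ≤ (pvLayer adj i l p F).2.length := by
          cases hx : (pvLayer adj i l p F).2 with
          | nil => exact absurd hx hnxe
          | cons a t => simp
        apply ih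
        · intro v hv
          have hnew := pvLayer_new adj i F ((l, p), []) (by intro k hk; simp at hk) v hv
          rw [show i + 1 - 1 = i by ring]
          simpa [pvLayer] using hnew
        · exact pvLayer_nodup adj i F ((l, p), []) (by simpa using hnd)
        · exact pvLayer_keys adj i U HadjU F ((l, p), []) (by simpa using hsub)
        · omega
        · omega

-- ======= bridge: the popping queue loop vs B's cursor loop over the combined dict =======

-- the representation relation between A's pair of dicts and B's combined dict
def pvRel (l : PySem.Dict Int Int) (p : PySem.Dict Int (Option Int))
    (info : PySem.Dict Int (Int × Option Int)) : Prop :=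
  l.items = info.items.map (fun kv => (kv.1, kv.2.1)) ∧
  p.items = info.items.map (fun kv => (kv.1, kv.2.2))

theorem pvRel_get? (l : PySem.Dict Int Int) (p : PySem.Dict Int (Option Int))
    (info : PySem.Dict Int (Int × Option Int)) (h : pvRel l p info) (k : Int) :
    l.get? k = (info.get? k).map (·.1) := by
  obtain ⟨h1, -⟩ := h
  obtain ⟨L⟩ := info
  obtain ⟨L'⟩ := l
  subst h1
  induction L with
  | nil => rfl
  | cons q t ih =>
    rw [List.map_cons, PySem.Dict.get?_mk_cons, PySem.Dict.get?_mk_cons]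
    by_cases hk : q.1 == k
    · simp [hk]
    · simp only [hk, Bool.false_eq_true, if_false]
      exact ih

theorem pvRel_get?_p (l : PySem.Dict Int Int) (p : PySem.Dict Int (Option Int))
    (info : PySem.Dict Int (Int × Option Int)) (h : pvRel l p info) (k : Int) :
    p.get? k = (info.get? k).map (·.2) := by
  obtain ⟨-, h2⟩ := h
  obtain ⟨L⟩ := info
  obtain ⟨L'⟩ := p
  subst h2
  induction L with
  | nil => rfl
  | cons q t ih =>
    rw [List.map_cons, PySem.Dict.get?_mk_cons, PySem.Dict.get?_mk_cons]
    by_cases hk : q.1 == k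
    · simp [hk]
    · simp only [hk, Bool.false_eq_true, if_false]
      exact ih

theorem pvRel_contains (l : PySem.Dict Int Int) (p : PySem.Dict Int (Option Int))
    (info : PySem.Dict Int (Int × Option Int)) (h : pvRel l p info) (k : Int) :
    l.contains k = info.contains k := by
  rw [PySem.Dict.contains_eq_isSome_get?, PySem.Dict.contains_eq_isSome_get?,
    pvRel_get? l p info h k]
  cases info.get? k <;> rfl

theorem pvRel_getD (l : PySem.Dict Int Int) (p : PySem.Dict Int (Option Int))
    (info : PySem.Dict Int (Int × Option Int)) (h : pvRel l p info) (k : Int) :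
    l.getD k 0 = (info.getD k (0, none)).1 := by
  rw [PySem.Dict.getD_eq_get?_getD, PySem.Dict.getD_eq_get?_getD, pvRel_get? l p info h k]
  cases info.get? k <;> rfl

theorem pvRel_insert (l : PySem.Dict Int Int) (p : PySem.Dict Int (Option Int))
    (info : PySem.Dict Int (Int × Option Int)) (h : pvRel l p info) (u v w : Int)
    (hc : info.contains v = false) :
    pvRel (l.insert v w) (p.insert v (some u)) (info.insert v (w, some u)) := by
  have hcl : l.contains v = false := by rw [pvRel_contains l p info h v]; exact hc
  have hcp : p.contains v = false := by
    rw [PySem.Dict.contains_eq_isSome_get?, pvRel_get?_p l p info h v,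
      (PySem.Dict.get?_eq_none_iff_contains _ _).2 hc]
    rfl
  obtain ⟨h1, h2⟩ := h
  constructor
  · rw [PySem.Dict.items_insert_of_not_contains _ _ hcl,
      PySem.Dict.items_insert_of_not_contains _ _ hc, List.map_append, h1]
    rfl
  · rw [PySem.Dict.items_insert_of_not_contains _ _ hcp,
      PySem.Dict.items_insert_of_not_contains _ _ hc, List.map_append, h2]
    rfl

-- inner loops agree: A's fold from an empty out-queue vs B's pvBVisit appending to order
theorem pvVisit_sim (w u : Int) :
    ∀ (ns : List Int) (l : PySem.Dict Int Int) (p : PySem.Dict Int (Option Int))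
      (info : PySem.Dict Int (Int × Option Int)) (order : List Int),
      pvRel l p info →
      pvRel (ns.foldl (pvAInn w u) ((l, p), [])).1.1 (ns.foldl (pvAInn w u) ((l, p), [])).1.2
        (pvBVisit w u ns info order).1 ∧
      (pvBVisit w u ns info order).2 = order ++ (ns.foldl (pvAInn w u) ((l, p), [])).2 := by
  intro ns
  induction ns with
  | nil => intro l p info order h; exact ⟨h, by simp [pvBVisit]⟩
  | cons v vs ih =>
    intro l p info order h
    rw [List.foldl_cons]
    by_cases hc : info.contains v = true
    · have hcl : l.contains v = true := by rw [pvRel_contains l p info h v]; exact hc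
      rw [pvAInn_pos w u ((l, p), []) v hcl]
      have := ih l p info order h
      simpa [pvBVisit, hc] using this
    · have hc' : info.contains v = false := by simpa using hc
      have hcl : l.contains v = false := by rw [pvRel_contains l p info h v]; exact hc'
      rw [pvAInn_neg w u ((l, p), []) v hcl]
      dsimp only
      rw [List.nil_append]
      have hrel' := pvRel_insert l p info h u v w hc'
      have hstep := ih (l.insert v w) (p.insert v (some u)) (info.insert v (w, some u))
        (order ++ [v]) hrel'
      rw [foldl_q (pvAInn w u) (pvAInn_q w u) vs ((l.insert v w), (p.insert v (some u))) [v]]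
      refine ⟨?_, ?_⟩
      · simpa [pvBVisit, hc'] using hstep.1
      · have h2 : (pvBVisit w u (v :: vs) info order).2
            = (pvBVisit w u vs (info.insert v (w, some u)) (order ++ [v])).2 := by
          simp [pvBVisit, hc']
        rw [h2, hstep.2]
        simp

theorem pvBVisit_nodup (w u : Int) :
    ∀ (ns : List Int) (info : PySem.Dict Int (Int × Option Int)) (order : List Int),
      info.keys.Nodup → (pvBVisit w u ns info order).1.keys.Nodup := by
  intro ns
  induction ns with
  | nil => intro info order h; exact h
  | cons v vs ih =>
    intro info order h
    by_cases hc : info.contains v = true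
    · simpa [pvBVisit, hc] using ih info order h
    · have hc' : info.contains v = false := by simpa using hc
      have := ih (info.insert v (w, some u)) (order ++ [v])
        (PySem.Dict.nodup_keys_insert _ _ _ h)
      simpa [pvBVisit, hc'] using this

-- fuel-synchronised simulation of the popping loop by the cursor loop
theorem pvQB_sim (adj : PySem.Dict Int (List Int)) :
    ∀ (f : Nat) (l : PySem.Dict Int Int) (p : PySem.Dict Int (Option Int))
      (info : PySem.Dict Int (Int × Option Int)) (order : List Int) (head : Nat),
      pvRel l p info → info.keys.Nodup → head ≤ order.length →
      pvRel (pvQLoop adj f l p (order.drop head)).1 (pvQLoop adj f l p (order.drop head)).2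
          (pvBLoop adj f info order head) ∧
        (pvBLoop adj f info order head).keys.Nodup := by
  intro f
  induction f with
  | zero => intro l p info order head h hnd _; exact ⟨h, hnd⟩
  | succ f ih =>
    intro l p info order head h hnd hle
    by_cases hlt : head < order.length
    · have hdrop : order.drop head = order.getD head 0 :: order.drop (head + 1) := by
        rw [List.getD_eq_getElem order 0 hlt]
        exact List.drop_eq_getElem_cons hlt
      set u := order.getD head 0 with hu
      have hw : l.getD u 0 + 1 = (info.getD u (0, none)).1 + 1 := by
        rw [pvRel_getD l p info h u]
      rw [hdrop, pvQLoop_cons, hw]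
      set d := (info.getD u (0, none)).1 + 1 with hd
      have hB : pvBLoop adj (f + 1) info order head
          = pvBLoop adj f (pvBVisit d u (adj.getD u []) info order).1
              (pvBVisit d u (adj.getD u []) info order).2 (head + 1) := by
        have hunf : pvBLoop adj (f + 1) info order head
            = if head < order.length then
                pvBLoop adj f (pvBVisit d u (adj.getD u []) info order).1
                  (pvBVisit d u (adj.getD u []) info order).2 (head + 1)
              else info := rfl
        rw [hunf, if_pos hlt]
      rw [hB]
      have hsim := pvVisit_sim d u (adj.getD u []) l p info order h
      rw [foldl_q (pvAInn d u) (pvAInn_q d u) (adj.getD u []) (l, p) (order.drop (head + 1))]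
      set F := (adj.getD u []).foldl (pvAInn d u) ((l, p), []) with hF
      have horder : (pvBVisit d u (adj.getD u []) info order).2 = order ++ F.2 := hsim.2
      have hq : order.drop (head + 1) ++ F.2
          = (pvBVisit d u (adj.getD u []) info order).2.drop (head + 1) := by
        rw [horder, List.drop_append]
        have h0 : head + 1 - order.length = 0 := by omega
        rw [h0]
        simp
      rw [hq]
      exact ih F.1.1 F.1.2 (pvBVisit d u (adj.getD u []) info order).1
        (pvBVisit d u (adj.getD u []) info order).2 (head + 1) hsim.1
        (pvBVisit_nodup d u (adj.getD u []) info order hnd)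
        (by rw [horder]; simp; omega)
    · have hdrop : order.drop head = [] := List.drop_eq_nil_of_le (by omega)
      have hB : pvBLoop adj (f + 1) info order head = info := by
        have hunf : pvBLoop adj (f + 1) info order head
            = if head < order.length then
                pvBLoop adj f
                  (pvBVisit ((info.getD (order.getD head 0) (0, none)).1 + 1) (order.getD head 0)
                    (adj.getD (order.getD head 0) []) info order).1
                  (pvBVisit ((info.getD (order.getD head 0) (0, none)).1 + 1) (order.getD head 0)
                    (adj.getD (order.getD head 0) []) info order).2 (head + 1)
              else info := rfl
        rw [hunf, if_neg hlt]
      rw [hdrop, pvQLoop_nil, hB]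
      exact ⟨h, hnd⟩

-- update is the fold of insert; ofList of a nodup-key list keeps its items verbatim
theorem pvUpdate_eq_foldl {K V : Type} [BEq K] [LawfulBEq K] :
    ∀ (L : List (K × V)) (d : PySem.Dict K V),
      d.update L = L.foldl (fun d a => d.insert a.1 a.2) d := by
  intro L
  induction L with
  | nil => intro d; rfl
  | cons q t ih =>
    intro d
    have h0 : d.update (q :: t) = (d.insert q.1 q.2).update t := rfl
    rw [h0, List.foldl_cons, ih]

theorem pvItems_ofList_nodup {V : Type} (L : List (Int × V)) (h : (L.map Prod.fst).Nodup) :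
    (PySem.Dict.ofList L).items = L := by
  have h1 : PySem.Dict.ofList L = L.foldl (fun d a => d.insert a.1 a.2) PySem.Dict.empty :=
    pvUpdate_eq_foldl L PySem.Dict.empty
  rw [h1]
  have h2 := PySem.Dict.items_foldl_insert_fresh L Prod.fst Prod.snd PySem.Dict.empty
    (by intro a _; exact PySem.Dict.contains_empty _) h
  simpa using h2

-- ===== VERDICT (by name: the statement is the Claim_ definition above) =====
theorem BFS_spec : Claim_equal_BFS := by
  intro node adj_list _ _
  unfold Spec_BFS BFS BFS_alt
  dsimp only
  have hsz1 : (PySem.Dict.empty.insert node (0 : Int)).size = 1 := by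
    rw [PySem.Dict.size_insert]
    simp [PySem.Dict.empty, PySem.Dict.contains, PySem.Dict.size]
  set adj := PySem.Dict.ofList adj_list with hadj
  set fuel := (adj_list.flatMap (fun kv => kv.2)).length + 2 with hfuel
  have hAQ : pvALoop adj fuel
        (PySem.Dict.empty.insert node 0) (PySem.Dict.empty.insert node none) 1 [node]
      = pvQLoop adj fuel
        (PySem.Dict.empty.insert node 0) (PySem.Dict.empty.insert node none) [node] := by
    apply pvSim adj (node :: adj_list.flatMap (fun kv => kv.2))
      (fun u x hx => List.mem_cons_of_mem _ (pvGetD_sub adj_list u x hx))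
    · intro u hu
      simp only [List.mem_singleton] at hu
      subst hu
      simp
    · exact PySem.Dict.nodup_keys_insert _ _ _ (by simp [PySem.Dict.empty, PySem.Dict.keys])
    · intro k hk
      rcases (PySem.Dict.mem_keys_insert _ _ _ _).1 hk with h1 | h1
      · simp [h1]
      · simp [PySem.Dict.empty, PySem.Dict.keys] at h1
    · simp only [hsz1, List.length_cons]
      omega
    · simp only [hsz1, List.length_cons, List.length_nil]
      omega
  have hrel0 : pvRel (PySem.Dict.empty.insert node 0) (PySem.Dict.empty.insert node none)
      (PySem.Dict.empty.insert node (0, none)) := by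
    constructor <;>
      simp [PySem.Dict.items_insert_of_not_contains, PySem.Dict.empty]
  have hnd0 : (PySem.Dict.empty.insert node ((0 : Int), (none : Option Int))).keys.Nodup :=
    PySem.Dict.nodup_keys_insert _ _ _ (by simp [PySem.Dict.empty, PySem.Dict.keys])
  have hQB := pvQB_sim adj fuel (PySem.Dict.empty.insert node 0)
    (PySem.Dict.empty.insert node none) (PySem.Dict.empty.insert node (0, none)) [node] 0
    hrel0 hnd0 (by simp)
  set info := pvBLoop adj fuel (PySem.Dict.empty.insert node (0, none)) [node] 0 with hinfo
  have hdrop0 : ([node] : List Int).drop 0 = [node] := rfl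
  rw [hdrop0] at hQB
  obtain ⟨⟨hrl, hrp⟩, hnd⟩ := hQB
  have hk1 : (info.items.map (fun kv => (kv.1, kv.2.1))).map Prod.fst = info.keys := by
    rw [List.map_map]; rfl
  have hk2 : (info.items.map (fun kv => (kv.1, kv.2.2))).map Prod.fst = info.keys := by
    rw [List.map_map]; rfl
  have ho1 : (PySem.Dict.ofList (info.items.map (fun kv => (kv.1, kv.2.1)))).items
      = info.items.map (fun kv => (kv.1, kv.2.1)) :=
    pvItems_ofList_nodup _ (by rw [hk1]; exact hnd)
  have ho2 : (PySem.Dict.ofList (info.items.map (fun kv => (kv.1, kv.2.2)))).items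
      = info.items.map (fun kv => (kv.1, kv.2.2)) :=
    pvItems_ofList_nodup _ (by rw [hk2]; exact hnd)
  rw [hAQ]
  exact Prod.ext (by rw [hrl, ho1]) (by rw [hrp, ho2])
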